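-- pv_equiv track=rewrite | github.com/MishalAhmed6/AdsGen | processing_layer/analyzers/regional_analyzer.py | _determine_primary_region
-- ===== SOURCE A (Python) =====
-- from typing import List, Dict, Any, Optional, Set
--
-- def _determine_primary_region(regions: List[str]) -> Optional[str]:
--     """Determine the primary region from the list."""
--     if not regions:
--         return None
--
--     # If only one region, return it
--     if len(regions) == 1:
--         return regions[0]
--
--     # If multiple regions, choose the most significant one
--     # Prioritize major metropolitan areas
--     metro_priority = ["New York Metro", "Los Angeles Metro", "San Francisco Bay Area",
--                      "Chicago Metro", "Houston Metro", "Miami Metro"]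
--
--     for metro in metro_priority:
--         if metro in regions:
--             return metro
--
--     # Return the first region if no metro area found
--     return regions[0]
-- ===== SOURCE B (Python) =====
-- def _determine_primary_region(regions):
--     """Determine the primary region from the list."""
--     if not regions:
--         return None
--     metro_priority = ["New York Metro", "Los Angeles Metro", "San Francisco Bay Area",
--                       "Chicago Metro", "Houston Metro", "Miami Metro"]
--     rank = {name: i for i, name in enumerate(metro_priority)}
--     best = None
--     best_rank = len(metro_priority)
--     for region in regions:
--         r = rank.get(region)
--         if r is not None and r < best_rank:
--             best, best_rank = region, r
--     return best if best is not None else regions[0]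
-- ===== Notes on version B (the rewrite author's own statement) =====
-- stated objective: alternative
-- what changed: Replaces the six repeated membership scans over regions (one per metro in priority order) with a precomputed name-to-priority-index dict and a single pass over regions tracking the region of smallest rank.
import Mathlib
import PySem

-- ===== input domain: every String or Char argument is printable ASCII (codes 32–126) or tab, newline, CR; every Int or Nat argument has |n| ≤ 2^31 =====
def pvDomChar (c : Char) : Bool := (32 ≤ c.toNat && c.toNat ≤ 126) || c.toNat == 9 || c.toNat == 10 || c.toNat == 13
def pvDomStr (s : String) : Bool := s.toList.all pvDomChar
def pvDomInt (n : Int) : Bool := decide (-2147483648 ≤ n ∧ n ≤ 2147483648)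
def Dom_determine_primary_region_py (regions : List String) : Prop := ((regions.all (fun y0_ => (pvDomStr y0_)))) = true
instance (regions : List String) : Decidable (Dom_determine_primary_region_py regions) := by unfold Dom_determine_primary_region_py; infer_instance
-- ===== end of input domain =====

-- B replaces A's six membership scans over `regions` (one per metro, in priority order) with a
-- precomputed name→priority-index dict and a single pass over `regions` tracking the smallest rank.

-- ===== PORT A =====
-- metro_priority, the literal list both Pythons spell out
def pvMetros : List String :=
  ["New York Metro", "Los Angeles Metro", "San Francisco Bay Area",
   "Chicago Metro", "Houston Metro", "Miami Metro"]

def determine_primary_region_py (regions : List String) : Option String :=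
  if regions = [] then none
  else if PySem.List.len regions = 1 then PySem.List.pyGet? regions 0
  else
    -- `for metro in metro_priority: if metro in regions: return metro`
    match pvMetros.find? (fun m => regions.contains m) with
    | some m => some m
    | none => PySem.List.pyGet? regions 0

-- ===== PORT B =====
-- rank = {name: i for i, name in enumerate(metro_priority)}
def pvRank : PySem.Dict String Int :=
  (PySem.List.enumerate pvMetros).foldl (fun d p => d.insert p.2 p.1) PySem.Dict.empty

-- the loop body: `r = rank.get(region); if r is not None and r < best_rank: best, best_rank = region, r`
def pvStep (st : Option String × Int) (region : String) : Option String × Int :=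
  match pvRank.get? region with
  | some r => if r < st.2 then (some region, r) else st
  | none => st

def determine_primary_region_py_alt (regions : List String) : Option String :=
  if regions = [] then none
  else
    let st := regions.foldl pvStep ((none : Option String), PySem.List.len pvMetros)
    match st.1 with
    | some b => some b
    | none => PySem.List.pyGet? regions 0

-- ===== PRECONDITION & SPEC =====
def Spec_determine_primary_region_py (regions : List String) (out : Option String) : Prop := out = determine_primary_region_py_alt regions
instance (regions : List String) (out : Option String) : Decidable (Spec_determine_primary_region_py regions out) := by unfold Spec_determine_primary_region_py; infer_instance

-- ===== CLAIM (what is proved, stated in full; the proofs are below) =====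
def Claim_equal_determine_primary_region_py : Prop := ∀ (regions : List String), Dom_determine_primary_region_py regions → Spec_determine_primary_region_py regions (determine_primary_region_py regions)

-- ===== LEMMAS AND PROOFS =====

-- lookup in the rank dict, as an if-chain
set_option maxRecDepth 4096 in
theorem pvRank_get (r : String) : pvRank.get? r =
    if r = "New York Metro" then some 0
    else if r = "Los Angeles Metro" then some 1
    else if r = "San Francisco Bay Area" then some 2
    else if r = "Chicago Metro" then some 3
    else if r = "Houston Metro" then some 4
    else if r = "Miami Metro" then some 5
    else none := by
  have h : pvRank = PySem.Dict.mk
      [("New York Metro", 0), ("Los Angeles Metro", 1), ("San Francisco Bay Area", 2),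
       ("Chicago Metro", 3), ("Houston Metro", 4), ("Miami Metro", 5)] := by rfl
  rw [h]
  simp only [PySem.Dict.get?]
  split_ifs <;> simp_all
  exact ⟨fun h => ‹¬r = "New York Metro"› h.symm, fun h => ‹¬r = "Los Angeles Metro"› h.symm,
    fun h => ‹¬r = "San Francisco Bay Area"› h.symm, fun h => ‹¬r = "Chicago Metro"› h.symm,
    fun h => ‹¬r = "Houston Metro"› h.symm, fun h => ‹¬r = "Miami Metro"› h.symm⟩

-- pvMetros[i] as an Option, for the rank carried in the fold state
def pvMsAt (i : Int) : Option String := PySem.List.pyGet? pvMetros i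

-- the rank component of B's fold
def pvG (regions : List String) (i : Int) : Int :=
  regions.foldl
    (fun a r => match pvRank.get? r with
      | some k => if k < a then k else a
      | none => a) i

-- index of the first priority metro present in regions (6 if none)
def pvH (regions : List String) : Int :=
  if "New York Metro" ∈ regions then 0
  else if "Los Angeles Metro" ∈ regions then 1
  else if "San Francisco Bay Area" ∈ regions then 2
  else if "Chicago Metro" ∈ regions then 3
  else if "Houston Metro" ∈ regions then 4
  else if "Miami Metro" ∈ regions then 5
  else 6

theorem pvRank_some (r : String) (k : Int) (hr : pvRank.get? r = some k) :
    0 ≤ k ∧ k ≤ 5 ∧ pvMsAt k = some r := by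
  rw [pvRank_get] at hr
  split_ifs at hr <;>
    (injection hr with h2; subst h2; subst_eqs; exact ⟨by decide, by decide, by decide⟩)

theorem pvFold_pair (regions : List String) : ∀ i : Int, 0 ≤ i → i ≤ 6 →
    regions.foldl pvStep (pvMsAt i, i) = (pvMsAt (pvG regions i), pvG regions i) := by
  induction regions with
  | nil => intro i _ _; simp [pvG]
  | cons r rs ih =>
    intro i h0 h6
    rcases hr : pvRank.get? r with _ | k
    · have hstep : pvStep (pvMsAt i, i) r = (pvMsAt i, i) := by simp [pvStep, hr]
      have hg : pvG (r :: rs) i = pvG rs i := by simp [pvG, hr]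
      rw [List.foldl_cons, hstep, hg]; exact ih i h0 h6
    · have hk := pvRank_some r k hr
      have hstep : pvStep (pvMsAt i, i) r
          = (pvMsAt (if k < i then k else i), if k < i then k else i) := by
        by_cases hlt : k < i <;> simp [pvStep, hr, hlt, hk.2.2]
      have hg : pvG (r :: rs) i = pvG rs (if k < i then k else i) := by
        simp [pvG, hr]
      rw [List.foldl_cons, hstep, hg]
      exact ih _ (by omega) (by omega)

theorem pvRank_none (r : String) (hr : pvRank.get? r = none) (rs : List String) :
    pvH (r :: rs) = pvH rs := by
  rw [pvRank_get] at hr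
  split_ifs at hr
  simp only [pvH, List.mem_cons]
  simp_all [eq_comm]

set_option maxHeartbeats 1000000 in
theorem pvH_cons_some (r : String) (k : Int) (hr : pvRank.get? r = some k) (rs : List String) :
    pvH (r :: rs) = min k (pvH rs) := by
  rw [pvRank_get] at hr
  split_ifs at hr <;>
    (injection hr with h2; subst h2; subst_eqs;
     simp only [pvH, List.mem_cons]
     simp
     split_ifs <;> omega)

theorem pvG_eq (regions : List String) : ∀ i : Int, 0 ≤ i → i ≤ 6 →
    pvG regions i = min i (pvH regions) := by
  induction regions with
  | nil => intro i h0 h6; simp only [pvG, List.foldl_nil, pvH]; simp; omega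
  | cons r rs ih =>
    intro i h0 h6
    rcases hr : pvRank.get? r with _ | k
    · have hg : pvG (r :: rs) i = pvG rs i := by simp [pvG, hr]
      rw [hg, pvRank_none r hr rs, ih i h0 h6]
    · have hk := pvRank_some r k hr
      have hg : pvG (r :: rs) i = pvG rs (if k < i then k else i) := by simp [pvG, hr]
      rw [hg, pvH_cons_some r k hr rs]
      by_cases hlt : k < i
      · rw [if_pos hlt, ih k hk.1 (by omega)]; omega
      · rw [if_neg hlt, ih i h0 h6]; omega

-- pvH is between 0 and 6
theorem pvH_bounds (regions : List String) : 0 ≤ pvH regions ∧ pvH regions ≤ 6 := by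
  simp only [pvH]; split_ifs <;> omega

-- if pvH regions < 6 then the metro at that rank is a member of regions
theorem mem_of_pvH_lt (regions : List String) (h : pvH regions < 6) :
    ∃ s, pvMsAt (pvH regions) = some s ∧ s ∈ regions := by
  simp only [pvH] at h ⊢
  split_ifs at h ⊢ <;> first | omega | exact ⟨_, rfl, ‹_›⟩

-- B's value on a nonempty list, characterised by pvH
theorem alt_char (regions : List String) (hne : regions ≠ []) :
    determine_primary_region_py_alt regions =
      if pvH regions < 6 then pvMsAt (pvH regions) else PySem.List.pyGet? regions 0 := by
  have hh := pvH_bounds regions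
  have hfold := pvFold_pair regions 6 (by omega) (by omega)
  have h6 : pvMsAt 6 = none := by decide
  have hg := pvG_eq regions 6 (by omega) (by omega)
  have hmin : pvG regions 6 = pvH regions := by omega
  simp only [determine_primary_region_py_alt, if_neg hne]
  have hlen : PySem.List.len pvMetros = (6 : Int) := by decide
  rw [hlen, ← h6, hfold, hmin]
  by_cases hlt : pvH regions < 6
  · rw [if_pos hlt]
    rcases mem_of_pvH_lt regions hlt with ⟨s, hs, _⟩
    rw [hs]
  · rw [if_neg hlt]
    have h6' : pvH regions = 6 := by omega
    rw [h6', h6]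

-- A's metro scan, characterised by pvH
theorem find_char (regions : List String) :
    pvMetros.find? (fun m => regions.contains m) =
      if pvH regions < 6 then pvMsAt (pvH regions) else none := by
  simp only [pvMetros, List.find?, List.contains_eq_mem, pvH]
  split_ifs <;> simp_all <;> decide

-- ===== VERDICT (by name: the statement is the Claim_ definition above) =====
theorem determine_primary_region_py_spec : Claim_equal_determine_primary_region_py := by
  intro regions _
  unfold Spec_determine_primary_region_py
  rcases regions with _ | ⟨r, rs⟩
  · rfl
  rcases rs with _ | ⟨r2, rs'⟩
  · -- singleton: A returns regions[0]
    rw [alt_char [r] (by simp)]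
    by_cases hlt : pvH [r] < 6
    · rcases mem_of_pvH_lt [r] hlt with ⟨s, hs, hmem⟩
      simp only [List.mem_singleton] at hmem
      subst hmem
      rw [if_pos hlt, hs]
      simp [determine_primary_region_py, PySem.List.len]
    · rw [if_neg hlt]
      simp [determine_primary_region_py, PySem.List.len]
  · -- length ≥ 2: A takes the metro scan
    have hne : (r :: r2 :: rs') ≠ ([] : List String) := by simp
    rw [alt_char _ hne]
    simp only [determine_primary_region_py, if_neg hne]
    have hlen2 : PySem.List.len (r :: r2 :: rs') ≠ 1 := by
      simp [PySem.List.len]; omega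
    rw [if_neg hlen2, find_char]
    by_cases hlt : pvH (r :: r2 :: rs') < 6
    · rcases mem_of_pvH_lt _ hlt with ⟨s, hs, _⟩
      rw [if_pos hlt, if_pos hlt, hs]
    · rw [if_neg hlt, if_neg hlt]
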